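-- pv_equiv track=rewrite | github.com/lynhan/fun | dp/horse-stable.py | get_stables_sum
-- ===== SOURCE A (Python) =====
-- def get_stables_sum(stable):
--     total = 0
--     for s in stable:
--         product = 1
--         for h in s:
--             if h == "W":
--                 product *= 1
--             else:
--                 product *= 0
--         total += product
--     return total
-- ===== SOURCE B (Python) =====
-- def get_stables_sum(stable):
--     return sum(s == ["W"] * len(s) for s in stable)
-- ===== Notes on version B (the rewrite author's own statement) =====
-- stated objective: simpler
-- what changed: Replaces the nested multiply-accumulate loop (product over 0/1 per element) by a one-line count of rows equal to their all-"W" template (["W"]*len(s)).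
import Mathlib
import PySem

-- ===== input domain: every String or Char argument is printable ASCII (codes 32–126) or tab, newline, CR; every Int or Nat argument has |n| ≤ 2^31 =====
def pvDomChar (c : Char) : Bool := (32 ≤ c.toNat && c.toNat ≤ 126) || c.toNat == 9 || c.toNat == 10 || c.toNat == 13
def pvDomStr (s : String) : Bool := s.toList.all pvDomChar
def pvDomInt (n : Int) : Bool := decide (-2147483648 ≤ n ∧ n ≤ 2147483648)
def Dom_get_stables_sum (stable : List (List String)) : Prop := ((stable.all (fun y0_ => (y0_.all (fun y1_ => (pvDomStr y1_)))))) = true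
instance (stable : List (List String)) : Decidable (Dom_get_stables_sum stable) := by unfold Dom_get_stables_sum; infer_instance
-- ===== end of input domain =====

-- ===== PORT A =====
def get_stables_sum (stable : List (List String)) : Int :=
  stable.foldl
    (fun total s =>
      total + s.foldl (fun product h => if h == "W" then product * 1 else product * 0) 1)
    0

-- ===== PORT B =====
-- B: count the rows that equal their all-"W" template (["W"] * len(s)).
def get_stables_sum_alt (stable : List (List String)) : Int :=
  (stable.countP (fun s => s == List.replicate s.length "W") : Nat)

-- ===== PRECONDITION & SPEC =====
def Spec_get_stables_sum (stable : List (List String)) (out : Int) : Prop := out = get_stables_sum_alt stable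
instance (stable : List (List String)) (out : Int) : Decidable (Spec_get_stables_sum stable out) := by unfold Spec_get_stables_sum; infer_instance

-- ===== CLAIM (what is proved, stated in full; the proofs are below) =====
def Claim_equal_get_stables_sum : Prop := ∀ (stable : List (List String)), Dom_get_stables_sum stable → Spec_get_stables_sum stable (get_stables_sum stable)

-- ===== LEMMAS AND PROOFS =====

-- ===== VERDICT (by name: the statement is the Claim_ definition above) =====
-- inner loop of A: the product is 1 iff every element of the row is "W"
theorem pv_inner (s : List String) (p : Int) :
    s.foldl (fun product h => if h == "W" then product * 1 else product * 0) p
      = p * (if s.all (fun h => h == "W") then 1 else 0) := by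
  induction s generalizing p with
  | nil => simp
  | cons h t ih =>
    rw [List.foldl_cons, ih]
    by_cases hw : h = "W" <;> simp [hw]

-- outer loop of A accumulates the count of all-"W" rows
theorem pv_outer (stable : List (List String)) (t : Int) :
    stable.foldl
      (fun total s =>
        total + s.foldl (fun product h => if h == "W" then product * 1 else product * 0) 1)
      t
      = t + (stable.countP (fun s => s.all (fun h => h == "W")) : Nat) := by
  induction stable generalizing t with
  | nil => simp
  | cons s rest ih =>
    rw [List.foldl_cons, ih, pv_inner, List.countP_cons]
    by_cases hs : s.all (fun h => h == "W") = true <;> simp [hs] <;> push_cast <;> ring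

theorem pv_pred (s : List String) :
    (s == List.replicate s.length "W") = s.all (fun h => h == "W") := by
  rw [Bool.eq_iff_iff, beq_iff_eq, List.all_eq_true, List.eq_replicate_iff]
  simp

theorem get_stables_sum_spec : Claim_equal_get_stables_sum := by
  intro stable _
  unfold Spec_get_stables_sum get_stables_sum get_stables_sum_alt
  rw [pv_outer]
  simp [pv_pred]
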